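-- pv_equiv track=rewrite | github.com/morikouhei/programming_contest | atcoder/abc/abc293/f.py | search_b
-- ===== SOURCE A (Python) =====
-- def search_b(x,bit):
--
--     num = 0
--     now = 1
--     for j in range(6):
--         if bit >> j & 1:
--             num += now
--         now *= x
--     return num
-- ===== SOURCE B (Python) =====
-- def search_b(x, bit):
--     num = 0
--     for j in range(5, -1, -1):
--         num = num * x + (bit >> j & 1)
--     return num
-- ===== Notes on version B (the rewrite author's own statement) =====
-- stated objective: idiomatic
-- what changed: Horner's method: multiply-accumulate MSB-to-LSB instead of maintaining a running power of x and summing selected powers LSB-to-MSB.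
import Mathlib
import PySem

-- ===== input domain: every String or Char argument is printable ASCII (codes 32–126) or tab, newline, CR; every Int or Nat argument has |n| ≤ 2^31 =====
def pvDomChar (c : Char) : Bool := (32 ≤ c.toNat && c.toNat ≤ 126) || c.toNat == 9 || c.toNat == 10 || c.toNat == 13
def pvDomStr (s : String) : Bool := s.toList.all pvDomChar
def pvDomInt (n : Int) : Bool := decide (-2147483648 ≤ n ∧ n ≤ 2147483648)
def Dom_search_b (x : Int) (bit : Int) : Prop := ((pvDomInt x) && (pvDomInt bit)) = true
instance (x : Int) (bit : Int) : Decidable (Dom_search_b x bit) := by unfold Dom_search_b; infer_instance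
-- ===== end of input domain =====

-- B re-evaluates the same base-x number by Horner's rule (MSB-to-LSB multiply-accumulate) instead of A's running-power accumulator; objective: idiomatic.
-- ===== PORT A =====
-- Port of A: fold over range(6) with state (num, now).
def search_b (x : Int) (bit : Int) : Int :=
  (PySem.List.pyRange 0 6 1).foldl
    (fun (st : Int × Int) j =>
      let num := if Int.land (bit >>> j.toNat) 1 ≠ 0 then st.1 + st.2 else st.1
      (num, st.2 * x)) (0, 1) |>.1

-- ===== PORT B =====
-- Port of B: Horner's rule, MSB to LSB over range(5, -1, -1).
def search_b_alt (x : Int) (bit : Int) : Int :=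
  (PySem.List.pyRange 5 (-1) (-1)).foldl
    (fun num j => num * x + Int.land (bit >>> j.toNat) 1) 0

-- ===== PRECONDITION & SPEC =====
def Spec_search_b (x : Int) (bit : Int) (out : Int) : Prop := out = search_b_alt x bit
instance (x : Int) (bit : Int) (out : Int) : Decidable (Spec_search_b x bit out) := by unfold Spec_search_b; infer_instance

-- ===== CLAIM (what is proved, stated in full; the proofs are below) =====
def Claim_equal_search_b : Prop := ∀ (x : Int) (bit : Int), Dom_search_b x bit → Spec_search_b x bit (search_b x bit)

-- ===== LEMMAS AND PROOFS =====
theorem ldiff_one (m : Nat) : Nat.ldiff 1 m = if m % 2 = 1 then 0 else 1 := by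
  unfold Nat.ldiff Nat.bitwise
  norm_num
  rcases Nat.even_or_odd m with h | h
  · simp [Nat.even_iff.mp h]
  · have h' := Nat.odd_iff.mp h
    have : m ≠ 0 := by omega
    simp [h', this]

theorem land_one (n : Int) : Int.land n 1 = n % 2 := by
  cases n with
  | ofNat m =>
      show ((m &&& 1 : Nat) : Int) = _
      rw [Nat.and_one_is_mod]
      push_cast [Int.ofNat_eq_natCast]; rfl
  | negSucc m =>
      show ((Nat.ldiff 1 m : Nat) : Int) = _
      rw [ldiff_one]
      rcases Nat.even_or_odd m with h | h
      · have := Nat.even_iff.mp h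
        simp [this]
        omega
      · have := Nat.odd_iff.mp h
        simp [this]
        omega

-- ===== VERDICT (by name: the statement is the Claim_ definition above) =====
theorem if_emod (a t w : Int) : (if a % 2 ≠ 0 then t + w else t) = t + a % 2 * w := by
  rcases Int.emod_two_eq_zero_or_one a with h | h <;> simp [h]

theorem search_b_spec : Claim_equal_search_b := by
  intro x bit _
  show search_b x bit = search_b_alt x bit
  have hA : PySem.List.pyRange 0 6 1 = [0, 1, 2, 3, 4, 5] := by decide
  have hB : PySem.List.pyRange 5 (-1) (-1) = [5, 4, 3, 2, 1, 0] := by decide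
  simp only [search_b, search_b_alt, hA, hB, List.foldl_cons, List.foldl_nil, land_one, if_emod]
  ring
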